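-- pv_equiv track=rewrite | github.com/smallstepman/smallstepman.github.io | dotfiles/common/yazi/ohlcv.yazi/preview.py | find_header_by_priority
-- ===== SOURCE A (Python) =====
-- def normalize_header(name: str) -> str:
--     return "".join(ch for ch in name.strip().lower() if ch.isalnum())
--
-- def find_header_by_priority(fieldnames: list[str], aliases: list[str]) -> str | None:
--     normalized_to_name: dict[str, str] = {}
--     for name in fieldnames:
--         normalized = normalize_header(name)
--         if normalized not in normalized_to_name:
--             normalized_to_name[normalized] = name
--
--     for alias in aliases:
--         if alias in normalized_to_name:
--             return normalized_to_name[alias]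
--     return None
-- ===== SOURCE B (Python) =====
-- def normalize_header(name: str) -> str:
--     return "".join(ch for ch in name.strip().lower() if ch.isalnum())
--
-- def find_header_by_priority(fieldnames, aliases):
--     # For each alias in priority order, scan fieldnames front-to-back
--     # and return the first name whose normalized form equals the alias.
--     for alias in aliases:
--         for name in fieldnames:
--             if normalize_header(name) == alias:
--                 return name
--     return None
-- ===== Notes on version B (the rewrite author's own statement) =====
-- stated objective: simpler
-- what changed: B drops A's precomputed first-wins dict and instead, for each alias in priority order, directly scans fieldnames front-to-back returning the first name whose normalized form equals the alias; it is lazy, normalizing only until a match is found instead of normalizing and indexing every fieldname up front.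
import Mathlib
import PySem

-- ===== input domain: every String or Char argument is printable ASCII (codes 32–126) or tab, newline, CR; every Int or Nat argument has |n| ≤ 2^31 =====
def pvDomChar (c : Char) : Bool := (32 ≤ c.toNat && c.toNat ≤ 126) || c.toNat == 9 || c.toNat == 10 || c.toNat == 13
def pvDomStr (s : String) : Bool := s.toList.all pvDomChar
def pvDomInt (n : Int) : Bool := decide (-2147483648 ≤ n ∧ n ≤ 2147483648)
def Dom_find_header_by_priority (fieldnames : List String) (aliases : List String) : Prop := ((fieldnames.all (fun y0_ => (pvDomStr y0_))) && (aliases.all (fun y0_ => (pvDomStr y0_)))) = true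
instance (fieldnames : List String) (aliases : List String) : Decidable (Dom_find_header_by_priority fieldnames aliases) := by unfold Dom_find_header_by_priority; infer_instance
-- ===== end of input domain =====

-- B replaces A's precomputed first-wins dict with a direct per-alias front-to-back scan
-- of the fieldnames (simpler decomposition; same return value).

-- ===== PORT A =====
-- normalize_header: "".join(ch for ch in name.strip().lower() if ch.isalnum())
-- (joining single characters with "" is exactly building the string from the char list)
def normalize_header (name : String) : String :=
  String.ofList ((PySem.Chars.lower (PySem.Chars.strip name.toList)).filter PySem.Chars.isalnum)

-- first loop of A: build normalized_to_name, keeping the FIRST name for each normalized key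
def pvBuildDict (fieldnames : List String) : PySem.Dict String String :=
  fieldnames.foldl
    (fun d name =>
      let normalized := normalize_header name
      if d.contains normalized then d else d.insert normalized name)
    PySem.Dict.empty

-- second loop of A: return dict[alias] for the first alias present in the dict
def pvLookupLoop (d : PySem.Dict String String) : List String → Option String
  | [] => none
  | alias_ :: rest => if d.contains alias_ then d.get? alias_ else pvLookupLoop d rest

def find_header_by_priority (fieldnames : List String) (aliases : List String) : Option String :=
  pvLookupLoop (pvBuildDict fieldnames) aliases

-- ===== PORT B =====
-- outer loop over aliases; inner scan of fieldnames is Source B's inner for-loop (first hit wins)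
def find_header_by_priority_alt (fieldnames : List String) (aliases : List String) : Option String :=
  match aliases with
  | [] => none
  | alias_ :: rest =>
    match fieldnames.find? (fun name => normalize_header name == alias_) with
    | some name => some name
    | none => find_header_by_priority_alt fieldnames rest

-- ===== PRECONDITION & SPEC =====
def Spec_find_header_by_priority (fieldnames : List String) (aliases : List String) (out : Option String) : Prop := out = find_header_by_priority_alt fieldnames aliases
instance (fieldnames : List String) (aliases : List String) (out : Option String) : Decidable (Spec_find_header_by_priority fieldnames aliases out) := by unfold Spec_find_header_by_priority; infer_instance

-- ===== CLAIM (what is proved, stated in full; the proofs are below) =====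
def Claim_equal_find_header_by_priority : Prop := ∀ (fieldnames : List String) (aliases : List String), Dom_find_header_by_priority fieldnames aliases → Spec_find_header_by_priority fieldnames aliases (find_header_by_priority fieldnames aliases)

-- ===== LEMMAS AND PROOFS =====

-- A's first-wins dict answers exactly what a front-to-back scan of fieldnames answers.
theorem pvGet_buildDict_aux (fs : List String) (d : PySem.Dict String String) (a : String) :
    PySem.Dict.get? (fs.foldl
      (fun d name =>
        let normalized := normalize_header name
        if d.contains normalized then d else d.insert normalized name) d) a
    = (PySem.Dict.get? d a).or (fs.find? (fun name => normalize_header name == a)) := by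
  induction fs generalizing d with
  | nil => simp
  | cons n fs ih =>
    simp only [List.foldl_cons]
    by_cases hna : normalize_header n = a
    · have hfind : List.find? (fun name => normalize_header name == a) (n :: fs) = some n := by
        rw [List.find?_cons]; simp [hna]
      rw [hfind]
      by_cases hc : d.contains (normalize_header n) = true
      · rw [if_pos hc, ih]
        rw [hna, PySem.Dict.contains_eq_isSome_get?] at hc
        obtain ⟨v, hv⟩ := Option.isSome_iff_exists.mp hc
        simp [hv]
      · rw [if_neg hc, ih, PySem.Dict.get?_insert]
        have h0 : d.get? a = none := by
          rw [hna, PySem.Dict.contains_eq_isSome_get?] at hc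
          exact Option.not_isSome_iff_eq_none.mp (by simpa using hc)
        simp [hna, h0]
    · have hfind : List.find? (fun name => normalize_header name == a) (n :: fs)
          = List.find? (fun name => normalize_header name == a) fs := by
        have hb : (normalize_header n == a) = false := by simpa using hna
        rw [List.find?_cons, hb]
      rw [hfind]
      by_cases hc : d.contains (normalize_header n) = true
      · rw [if_pos hc, ih]
      · rw [if_neg hc, ih, PySem.Dict.get?_insert]
        have hne : ¬ a = normalize_header n := fun h => hna h.symm
        rw [if_neg hne]

theorem pvGet_buildDict (fs : List String) (a : String) :
    PySem.Dict.get? (pvBuildDict fs) a = fs.find? (fun name => normalize_header name == a) := by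
  unfold pvBuildDict
  rw [pvGet_buildDict_aux]
  simp

theorem pvLookup_eq_alt (fs : List String) (al : List String) :
    pvLookupLoop (pvBuildDict fs) al = find_header_by_priority_alt fs al := by
  induction al with
  | nil => rfl
  | cons a rest ih =>
    unfold pvLookupLoop find_header_by_priority_alt
    rw [PySem.Dict.contains_eq_isSome_get?, pvGet_buildDict]
    cases h : fs.find? (fun name => normalize_header name == a) with
    | none => simpa [h] using ih
    | some n => simp

-- ===== VERDICT (by name: the statement is the Claim_ definition above) =====
theorem find_header_by_priority_spec : Claim_equal_find_header_by_priority := by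
  intro fieldnames aliases _
  unfold Spec_find_header_by_priority find_header_by_priority
  exact pvLookup_eq_alt fieldnames aliases
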